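-- pv_equiv track=rewrite | github.com/uedaLabR/nanoModiTune | filter/FurtherFilter.py | group_by_position
-- ===== SOURCE A (Python) =====
-- def group_by_position(dataHolder, distance=2):
--     """
--     Groups items in dataHolder by chr, strand, and within a specified distance for pos.
--
--     Parameters:
--     dataHolder (list of tuples): List of tuples where each tuple represents
--                                  (chr, strand, pos, called_flg, filteredout, predict_flg, knownAndFlgOk, known_motif, row).
--     distance (int): The maximum distance (in bases) for grouping items by pos.
--
--     Returns:
--     list of lists: A list of grouped items, where each group is a list of tuples.
--     """
--     # Sort dataHolder by chr, strand, pos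
--     dataHolder = sorted(dataHolder, key=lambda x: (x[0], x[1], x[2]))
--
--     grouped_data = []
--     current_group = []
--     currentset = set()
--
--     for item in dataHolder:
--         # Unpack item
--         chr, strand, pos, called_flg, filteredout, predict_flg, knownAndFlgOk, known_motif, row = item
--
--         if not current_group:
--             # Start a new group
--             current_group.append(item)
--             currentset.add(called_flg)
--         else:
--             # Compare positions
--             last_pos = current_group[-1][2]
--             current_pos = pos
--
--             # If conditions match, add to current group
--             if (item[0] == current_group[-1][0] and item[1] == current_group[-1][1]
--                     and (current_pos - last_pos) <= distance and called_flg not in currentset):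
--                 current_group.append(item)
--                 currentset.add(called_flg)
--             else:
--                 # Start a new group
--                 grouped_data.append(current_group)
--                 current_group = [item]
--                 currentset = {called_flg}  # Start fresh set with current flag
--
--     # Append the last group if not empty
--     if current_group:
--         grouped_data.append(current_group)
--
--     return grouped_data
-- ===== SOURCE B (Python) =====
-- def group_by_position(dataHolder, distance=2):
--     # Two-pass reformulation: pass 1 cuts the sorted data into maximal runs of
--     # consecutive items sharing chr/strand within `distance`; pass 2 splits each
--     # run whenever a called_flg repeats. No combined condition, no set in pass 1.
--     data = sorted(dataHolder, key=lambda x: (x[0], x[1], x[2]))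
--
--     # pass 1: maximal adjacency runs (chr, strand, position distance only)
--     runs = []
--     cur = []
--     for item in data:
--         if cur and item[0] == cur[-1][0] and item[1] == cur[-1][1] \
--                 and item[2] - cur[-1][2] <= distance:
--             cur.append(item)
--         else:
--             if cur:
--                 runs.append(cur)
--             cur = [item]
--     if cur:
--         runs.append(cur)
--
--     # pass 2: split each run on a repeated called_flg (seen-set only)
--     result = []
--     for run in runs:
--         seen = set()
--         sub = []
--         for item in run:
--             if item[3] in seen:
--                 result.append(sub)
--                 sub = [item]
--                 seen = {item[3]}
--             else:
--                 sub.append(item)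
--                 seen.add(item[3])
--         result.append(sub)
--     return result
-- ===== Notes on version B (the rewrite author's own statement) =====
-- stated objective: alternative
-- what changed: Replaces A's single loop with one combined 4-way condition and one mutable set by two sequential passes: pass 1 cuts the sorted list into maximal chr/strand/distance adjacency runs (pairwise checks only, no set), pass 2 splits each run independently on a repeated called_flg with a per-run seen-set.
import Mathlib
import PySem

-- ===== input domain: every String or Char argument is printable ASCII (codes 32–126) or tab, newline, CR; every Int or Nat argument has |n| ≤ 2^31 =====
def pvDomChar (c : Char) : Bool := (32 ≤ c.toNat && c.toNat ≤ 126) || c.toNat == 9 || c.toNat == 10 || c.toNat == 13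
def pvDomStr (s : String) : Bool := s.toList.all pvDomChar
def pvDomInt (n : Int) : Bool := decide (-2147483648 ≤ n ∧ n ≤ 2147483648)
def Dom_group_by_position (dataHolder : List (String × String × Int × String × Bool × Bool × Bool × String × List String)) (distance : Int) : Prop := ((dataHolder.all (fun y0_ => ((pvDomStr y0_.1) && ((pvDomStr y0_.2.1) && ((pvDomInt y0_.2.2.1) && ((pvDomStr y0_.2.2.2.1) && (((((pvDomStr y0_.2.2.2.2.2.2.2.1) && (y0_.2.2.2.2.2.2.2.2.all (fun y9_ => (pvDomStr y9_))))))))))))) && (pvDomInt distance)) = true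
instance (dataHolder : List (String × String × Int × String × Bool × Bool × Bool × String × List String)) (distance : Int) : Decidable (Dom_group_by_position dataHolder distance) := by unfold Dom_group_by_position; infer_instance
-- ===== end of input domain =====

-- B replaces A's single grouping loop (one combined chr/strand/distance/flag condition with one
-- running set) by two sequential passes: adjacency runs first, then per-run splitting on a
-- repeated called_flg; same return value, proved equal below.

abbrev PVItem := String × String × Int × String × Bool × Bool × Bool × String × List String

-- ===== shared helpers (both Pythons start with the same sorted(..., key=lambda x:(x[0],x[1],x[2]))) =====
-- strict lexicographic less on the 3-component key (x[0], x[1], x[2]); exact on the ASCII domain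
def pvKeyLt (a b : PVItem) : Bool :=
  decide (a.1 < b.1) ||
    (!decide (b.1 < a.1) &&
      (decide (a.2.1 < b.2.1) ||
        (!decide (b.2.1 < a.2.1) && decide (a.2.2.1 < b.2.2.1))))

-- sorted(xs, key=lambda x: (x[0], x[1], x[2])): the same stable insertion-sort mechanism as
-- PySem.List.sorted/sorted2 (which cover only 1- and 2-component keys), with the 3-key comparator
def pvSortData (xs : List PVItem) : List PVItem :=
  xs.foldl (fun acc x => PySem.List.insertBy pvKeyLt x acc) []

def pvFlg (x : PVItem) : String := x.2.2.2.1

-- item[0] == prev[0] and item[1] == prev[1] and item[2] - prev[2] <= distance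
def pvAdj (d : Int) (prev x : PVItem) : Bool :=
  x.1 == prev.1 && x.2.1 == prev.2.1 && decide (x.2.2.1 - prev.2.2.1 ≤ d)

-- ===== PORT A =====
-- loop body; state = (grouped_data, current_group, currentset); current_group[-1] via getLast? (nonempty in that branch)
def pvStepA (d : Int) (st : List (List PVItem) × List PVItem × PySem.Set String) (item : PVItem) :
    List (List PVItem) × List PVItem × PySem.Set String :=
  if st.2.1.isEmpty then
    (st.1, st.2.1 ++ [item], PySem.Set.add st.2.2 (pvFlg item))
  else
    if pvAdj d (st.2.1.getLast?.getD default) item && !(PySem.Set.contains st.2.2 (pvFlg item)) then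
      (st.1, st.2.1 ++ [item], PySem.Set.add st.2.2 (pvFlg item))
    else
      (st.1 ++ [st.2.1], [item], PySem.Set.ofList [pvFlg item])

def group_by_position (dataHolder : List (String × String × Int × String × Bool × Bool × Bool × String × List String)) (distance : Int) : List (List (String × String × Int × String × Bool × Bool × Bool × String × List String)) :=
  let ds := pvSortData dataHolder
  let st := ds.foldl (pvStepA distance) ([], [], PySem.Set.empty)
  if st.2.1.isEmpty then st.1 else st.1 ++ [st.2.1]

-- ===== PORT B =====
-- pass 1 loop body; state = (runs, cur)
def pvRunStep (d : Int) (st : List (List PVItem) × List PVItem) (item : PVItem) :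
    List (List PVItem) × List PVItem :=
  if !st.2.isEmpty && pvAdj d (st.2.getLast?.getD default) item then
    (st.1, st.2 ++ [item])
  else
    ((if st.2.isEmpty then st.1 else st.1 ++ [st.2]), [item])

def pvRunsB (d : Int) (data : List PVItem) : List (List PVItem) :=
  let st := data.foldl (pvRunStep d) ([], [])
  if st.2.isEmpty then st.1 else st.1 ++ [st.2]

-- pass 2 inner loop body; state = (result, sub, seen)
def pvSubStep (st : List (List PVItem) × List PVItem × PySem.Set String) (item : PVItem) :
    List (List PVItem) × List PVItem × PySem.Set String :=
  if PySem.Set.contains st.2.2 (pvFlg item) then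
    (st.1 ++ [st.2.1], [item], PySem.Set.ofList [pvFlg item])
  else
    (st.1, st.2.1 ++ [item], PySem.Set.add st.2.2 (pvFlg item))

-- pass 2 outer loop body: fresh seen/sub per run, final result.append(sub)
def pvSubdivideInto (res : List (List PVItem)) (run : List PVItem) : List (List PVItem) :=
  let st := run.foldl pvSubStep (res, [], PySem.Set.empty)
  st.1 ++ [st.2.1]

def group_by_position_alt (dataHolder : List (String × String × Int × String × Bool × Bool × Bool × String × List String)) (distance : Int) : List (List (String × String × Int × String × Bool × Bool × Bool × String × List String)) :=
  let data := pvSortData dataHolder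
  (pvRunsB distance data).foldl pvSubdivideInto []

-- ===== PRECONDITION & SPEC =====
-- decidable equality for the return type, assembled stepwise (instance search does not
-- synthesize the 9-component product in one go)
def pvD1 : DecidableEq (String × List String) := inferInstance
def pvD2 : DecidableEq (Bool × String × List String) := @instDecidableEqProd _ _ _ pvD1
def pvD3 : DecidableEq (Bool × Bool × String × List String) := @instDecidableEqProd _ _ _ pvD2
def pvD4 : DecidableEq (Bool × Bool × Bool × String × List String) := @instDecidableEqProd _ _ _ pvD3
def pvD5 : DecidableEq (String × Bool × Bool × Bool × String × List String) := @instDecidableEqProd _ _ _ pvD4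
def pvD6 : DecidableEq (Int × String × Bool × Bool × Bool × String × List String) := @instDecidableEqProd _ _ _ pvD5
def pvD7 : DecidableEq (String × Int × String × Bool × Bool × Bool × String × List String) := @instDecidableEqProd _ _ _ pvD6
def pvD8 : DecidableEq PVItem := @instDecidableEqProd _ _ _ pvD7
def pvD9 : DecidableEq (List (List PVItem)) := @instDecidableEqList _ (@instDecidableEqList _ pvD8)

def Spec_group_by_position (dataHolder : List (String × String × Int × String × Bool × Bool × Bool × String × List String)) (distance : Int) (out : List (List (String × String × Int × String × Bool × Bool × Bool × String × List String))) : Prop := out = group_by_position_alt dataHolder distance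
instance (dataHolder : List (String × String × Int × String × Bool × Bool × Bool × String × List String)) (distance : Int) (out : List (List (String × String × Int × String × Bool × Bool × Bool × String × List String))) : Decidable (Spec_group_by_position dataHolder distance out) := by unfold Spec_group_by_position; exact pvD9 out _

-- ===== CLAIM (what is proved, stated in full; the proofs are below) =====
def Claim_equal_group_by_position : Prop := ∀ (dataHolder : List (String × String × Int × String × Bool × Bool × Bool × String × List String)) (distance : Int), Dom_group_by_position dataHolder distance → Spec_group_by_position dataHolder distance (group_by_position dataHolder distance)

-- ===== LEMMAS AND PROOFS =====

-- A's loop from a nonempty current group, as a recursion producing the remaining groups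
def pvTailA (d : Int) : List PVItem → PySem.Set String → List PVItem → List (List PVItem)
  | c, _, [] => [c]
  | c, s, x :: xs =>
      if pvAdj d (c.getLast?.getD default) x && !(PySem.Set.contains s (pvFlg x)) then
        pvTailA d (c ++ [x]) (PySem.Set.add s (pvFlg x)) xs
      else
        c :: pvTailA d [x] (PySem.Set.ofList [pvFlg x]) xs

-- B's pass-1 loop from a nonempty current run, as a recursion
def pvRunsTail (d : Int) : List PVItem → List PVItem → List (List PVItem)
  | c, [] => [c]
  | c, x :: xs =>
      if pvAdj d (c.getLast?.getD default) x then pvRunsTail d (c ++ [x]) xs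
      else c :: pvRunsTail d [x] xs

-- B's pass-2 inner loop, as a recursion
def pvSubTail : List PVItem → PySem.Set String → List PVItem → List (List PVItem)
  | c, _, [] => [c]
  | c, s, x :: xs =>
      if PySem.Set.contains s (pvFlg x) then
        c :: pvSubTail [x] (PySem.Set.ofList [pvFlg x]) xs
      else
        pvSubTail (c ++ [x]) (PySem.Set.add s (pvFlg x)) xs

-- maximal adjacency run continuation after a previous item, and the remainder
def pvTake (d : Int) (prev : PVItem) : List PVItem → List PVItem
  | [] => []
  | x :: xs => if pvAdj d prev x then x :: pvTake d x xs else []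

def pvDrop (d : Int) (prev : PVItem) : List PVItem → List PVItem
  | [] => []
  | x :: xs => if pvAdj d prev x then pvDrop d x xs else x :: xs

theorem pvDrop_length_le (d : Int) (l : List PVItem) : ∀ prev, (pvDrop d prev l).length ≤ l.length := by
  induction l with
  | nil => intro prev; simp [pvDrop]
  | cons x xs ih =>
      intro prev
      simp only [pvDrop]
      split
      · exact le_trans (ih x) (Nat.le_succ _)
      · simp

def pvRest (d : Int) : List PVItem → List (List PVItem)
  | [] => []
  | x :: xs =>
      pvSubTail [x] (PySem.Set.ofList [pvFlg x]) (pvTake d x xs) ++ pvRest d (pvDrop d x xs)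
termination_by l => l.length
decreasing_by exact Nat.lt_succ_of_le (pvDrop_length_le d xs x)

def pvRunsOf (d : Int) : List PVItem → List (List PVItem)
  | [] => []
  | x :: xs => (x :: pvTake d x xs) :: pvRunsOf d (pvDrop d x xs)
termination_by l => l.length
decreasing_by exact Nat.lt_succ_of_le (pvDrop_length_le d xs x)

theorem pvLA (d : Int) (l : List PVItem) :
    ∀ (g : List (List PVItem)) (c : List PVItem) (s : PySem.Set String), c ≠ [] →
      (let st := l.foldl (pvStepA d) (g, c, s);
        if st.2.1.isEmpty then st.1 else st.1 ++ [st.2.1]) = g ++ pvTailA d c s l := by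
  induction l with
  | nil =>
      intro g c s hc
      simp [pvTailA, List.isEmpty_eq_false_iff.mpr hc]
  | cons x xs ih =>
      intro g c s hc
      simp only [List.foldl_cons, pvStepA, List.isEmpty_eq_false_iff.mpr hc, if_false,
        Bool.false_eq_true, pvTailA]
      by_cases h : (pvAdj d (c.getLast?.getD default) x && !(PySem.Set.contains s (pvFlg x))) = true
      · simp only [h, if_true]
        exact ih g (c ++ [x]) (PySem.Set.add s (pvFlg x)) (by simp)
      · simp only [h, if_false, Bool.false_eq_true]
        have := ih (g ++ [c]) [x] (PySem.Set.ofList [pvFlg x]) (by simp)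
        simp only [this, List.append_assoc, List.singleton_append]

theorem pvLB1 (d : Int) (l : List PVItem) :
    ∀ (g : List (List PVItem)) (c : List PVItem), c ≠ [] →
      (let st := l.foldl (pvRunStep d) (g, c);
        if st.2.isEmpty then st.1 else st.1 ++ [st.2]) = g ++ pvRunsTail d c l := by
  induction l with
  | nil =>
      intro g c hc
      simp [pvRunsTail, List.isEmpty_eq_false_iff.mpr hc]
  | cons x xs ih =>
      intro g c hc
      simp only [List.foldl_cons, pvRunStep, List.isEmpty_eq_false_iff.mpr hc, Bool.not_false,
        Bool.true_and, if_false, Bool.false_eq_true, pvRunsTail]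
      by_cases h : pvAdj d (c.getLast?.getD default) x = true
      · simp only [h, if_true]
        exact ih g (c ++ [x]) (by simp)
      · simp only [h, if_false, Bool.false_eq_true]
        have := ih (g ++ [c]) [x] (by simp)
        simp only [this, List.append_assoc, List.singleton_append]

theorem pvLB2 (run : List PVItem) :
    ∀ (res : List (List PVItem)) (c : List PVItem) (s : PySem.Set String),
      (let st := run.foldl pvSubStep (res, c, s); st.1 ++ [st.2.1]) = res ++ pvSubTail c s run := by
  induction run with
  | nil => intro res c s; simp [pvSubTail]
  | cons x xs ih =>
      intro res c s
      simp only [List.foldl_cons, pvSubStep, pvSubTail]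
      by_cases h : PySem.Set.contains s (pvFlg x) = true
      · simp only [h, if_true]
        have := ih (res ++ [c]) [x] (PySem.Set.ofList [pvFlg x])
        simp only [this, List.append_assoc, List.singleton_append]
      · simp only [h, if_false, Bool.false_eq_true]
        exact ih res (c ++ [x]) (PySem.Set.add s (pvFlg x))

theorem pvLB3 (runs : List (List PVItem)) :
    ∀ res, runs.foldl pvSubdivideInto res =
      res ++ runs.flatMap (fun r => pvSubTail [] PySem.Set.empty r) := by
  induction runs with
  | nil => intro res; simp
  | cons r rs ih =>
      intro res
      simp only [List.foldl_cons, List.flatMap_cons]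
      have h2 : pvSubdivideInto res r = res ++ pvSubTail [] PySem.Set.empty r := pvLB2 r res [] _
      rw [ih, h2, List.append_assoc]

theorem pvM (d : Int) (l : List PVItem) :
    ∀ (c : List PVItem) (s : PySem.Set String), c ≠ [] →
      pvTailA d c s l =
        pvSubTail c s (pvTake d (c.getLast?.getD default) l) ++
          pvRest d (pvDrop d (c.getLast?.getD default) l) := by
  induction l with
  | nil => intro c s hc; simp [pvTailA, pvTake, pvDrop, pvRest, pvSubTail]
  | cons x xs ih =>
      intro c s hc
      simp only [pvTailA, pvTake, pvDrop]
      by_cases ha : pvAdj d (c.getLast?.getD default) x = true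
      · simp only [ha, if_true]
        by_cases hs : PySem.Set.contains s (pvFlg x) = true
        · simp only [hs, Bool.not_true, Bool.and_false, if_false, Bool.false_eq_true, pvSubTail,
            if_true]
          have := ih [x] (PySem.Set.ofList [pvFlg x]) (by simp)
          simp only [List.getLast?_singleton, Option.getD_some] at this
          simp [this]
        · simp only [hs, Bool.not_false, Bool.and_true, if_true, pvSubTail, Bool.false_eq_true,
            if_false]
          have := ih (c ++ [x]) (PySem.Set.add s (pvFlg x)) (by simp)
          simpa using this
      · simp only [ha, Bool.false_and, if_false, Bool.false_eq_true, pvSubTail, pvRest]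
        have := ih [x] (PySem.Set.ofList [pvFlg x]) (by simp)
        simp only [List.getLast?_singleton, Option.getD_some] at this
        simp [this]

theorem pvN1 (d : Int) (l : List PVItem) :
    ∀ (c : List PVItem), c ≠ [] →
      pvRunsTail d c l =
        (c ++ pvTake d (c.getLast?.getD default) l) ::
          pvRunsOf d (pvDrop d (c.getLast?.getD default) l) := by
  induction l with
  | nil => intro c hc; simp [pvRunsTail, pvTake, pvDrop, pvRunsOf]
  | cons x xs ih =>
      intro c hc
      simp only [pvRunsTail, pvTake, pvDrop]
      by_cases ha : pvAdj d (c.getLast?.getD default) x = true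
      · simp only [ha, if_true]
        have := ih (c ++ [x]) (by simp)
        simpa using this
      · simp only [ha, if_false, Bool.false_eq_true, pvRunsOf]
        have := ih [x] (by simp)
        simp only [List.getLast?_singleton, Option.getD_some] at this
        simp [this]

theorem pvN2 (d : Int) (l : List PVItem) :
    pvRest d l = (pvRunsOf d l).flatMap (fun r => pvSubTail [] PySem.Set.empty r) := by
  induction l using pvRunsOf.induct d with
  | case1 => simp [pvRest, pvRunsOf]
  | case2 x xs ih =>
      rw [pvRest, pvRunsOf, List.flatMap_cons, ih]
      congr 1

-- ===== VERDICT (by name: the statement is the Claim_ definition above) =====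
theorem group_by_position_spec : Claim_equal_group_by_position := by
  intro dataHolder distance _
  unfold Spec_group_by_position group_by_position group_by_position_alt pvRunsB
  cases hds : pvSortData dataHolder with
  | nil => simp
  | cons x xs =>
      simp only [List.foldl_cons]
      have hA1 : pvStepA distance ([], [], PySem.Set.empty) x
          = ([], [x], PySem.Set.ofList [pvFlg x]) := by
        simp [pvStepA]; rfl
      have hB1 : pvRunStep distance ([], []) x = ([], [x]) := by
        simp [pvRunStep]
      rw [hA1, hB1]
      rw [pvLA distance xs [] [x] (PySem.Set.ofList [pvFlg x]) (by simp)]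
      rw [pvLB1 distance xs [] [x] (by simp)]
      simp only [List.nil_append]
      rw [pvLB3, List.nil_append]
      rw [pvN1 distance xs [x] (by simp)]
      rw [pvM distance xs [x] (PySem.Set.ofList [pvFlg x]) (by simp)]
      simp only [List.getLast?_singleton, Option.getD_some]
      rw [List.flatMap_cons, pvN2]
      congr 1
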